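-- pv_equiv track=rewrite | github.com/radhanama/Pas2Cs | transformer.py | _remove_empty_regions
-- ===== SOURCE A (Python) =====
-- def _remove_empty_regions(lines):
--     """Remove region blocks that contain no code or comments."""
--     result = []
--     i = 0
--     n = len(lines)
--     while i < n:
--         line = lines[i]
--         if line.strip().startswith('#region'):
--             j = i + 1
--             while j < n and lines[j].strip() == '':
--                 j += 1
--             if j < n and lines[j].strip().startswith('#endregion'):
--                 i = j + 1
--                 continue
--         result.append(line)
--         i += 1
--     return result
-- ===== SOURCE B (Python) =====
-- def _remove_empty_regions(lines):
--     """Remove region blocks that contain no code or comments."""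
--     result = []
--     pending = []  # buffered '#region' line plus trailing blank lines
--     for line in lines:
--         s = line.strip()
--         if pending:
--             if s == '':
--                 pending.append(line)
--                 continue
--             if s.startswith('#endregion'):
--                 pending = []
--                 continue
--             result.extend(pending)
--             pending = []
--         if s.startswith('#region'):
--             pending = [line]
--         else:
--             result.append(line)
--     result.extend(pending)
--     return result
-- ===== Notes on version B (the rewrite author's own statement) =====
-- stated objective: simpler
-- what changed: Replaced the index-based while loop with nested look-ahead rescan of blank runs by a single forward pass holding a pending-region buffer (region line + trailing blanks) that is discarded on '#endregion', flushed on other non-blank lines, and flushed at EOF.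
import Mathlib
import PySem

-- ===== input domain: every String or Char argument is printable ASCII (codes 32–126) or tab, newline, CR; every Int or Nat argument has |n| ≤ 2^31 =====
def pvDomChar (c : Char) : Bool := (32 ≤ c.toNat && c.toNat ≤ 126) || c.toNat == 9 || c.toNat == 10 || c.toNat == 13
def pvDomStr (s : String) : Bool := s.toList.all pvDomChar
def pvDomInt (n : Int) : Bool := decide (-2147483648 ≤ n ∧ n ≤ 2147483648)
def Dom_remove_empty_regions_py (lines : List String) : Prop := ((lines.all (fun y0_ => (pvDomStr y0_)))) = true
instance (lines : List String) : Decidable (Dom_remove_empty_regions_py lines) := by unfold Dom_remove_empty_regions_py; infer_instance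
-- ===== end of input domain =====

-- B replaces A's while loop with nested blank-run look-ahead by a single O(n) pass
-- carrying a pending-region buffer; objective: simpler.

-- ===== PORT A =====
-- inner while loop: 'while j < n and lines[j].strip() == "": j += 1'
def pvAScan (lines : List String) (n j : Nat) : Nat :=
  if _h : j < n ∧ PySem.Str.strip (lines.getD j "") = "" then
    pvAScan lines n (j + 1)
  else j
termination_by n - j
decreasing_by omega

theorem pvAScan_ge (lines : List String) (n j : Nat) : j ≤ pvAScan lines n j := by
  unfold pvAScan
  split
  · exact Nat.le_trans (Nat.le_succ j) (pvAScan_ge lines n (j + 1))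
  · exact Nat.le_refl j
termination_by n - j
decreasing_by
  rename_i h; omega

-- outer while loop of A (state: i, result)
def pvALoop (lines : List String) (n i : Nat) (result : List String) : List String :=
  if _h : i < n then
    let line := lines.getD i ""
    if PySem.Str.startswith (PySem.Str.strip line) "#region" then
      let j := pvAScan lines n (i + 1)
      if j < n ∧ PySem.Str.startswith (PySem.Str.strip (lines.getD j "")) "#endregion" then
        pvALoop lines n (j + 1) result
      else
        pvALoop lines n (i + 1) (result ++ [line])
    else
      pvALoop lines n (i + 1) (result ++ [line])
  else result
termination_by n - i
decreasing_by
  · have := pvAScan_ge lines n (i + 1); omega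
  · omega
  · omega

def remove_empty_regions_py (lines : List String) : List String :=
  pvALoop lines lines.length 0 []

-- ===== PORT B =====
-- B's for loop, one call per line; state: result, pending (buffered region line + blanks)
def pvBLoop (ls result pending : List String) : List String :=
  match ls with
  | [] => result ++ pending
  | line :: rest =>
    let s := PySem.Str.strip line
    match pending with
    | [] =>
      if PySem.Str.startswith s "#region" then pvBLoop rest result [line]
      else pvBLoop rest (result ++ [line]) []
    | p :: ps =>
      if s = "" then pvBLoop rest result ((p :: ps) ++ [line])
      else if PySem.Str.startswith s "#endregion" then pvBLoop rest result []
      else -- flush pending, then handle the current line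
        if PySem.Str.startswith s "#region" then pvBLoop rest (result ++ (p :: ps)) [line]
        else pvBLoop rest ((result ++ (p :: ps)) ++ [line]) []

def remove_empty_regions_py_alt (lines : List String) : List String :=
  pvBLoop lines [] []

-- ===== PRECONDITION & SPEC =====
def Spec_remove_empty_regions_py (lines : List String) (out : List String) : Prop := out = remove_empty_regions_py_alt lines
instance (lines : List String) (out : List String) : Decidable (Spec_remove_empty_regions_py lines out) := by unfold Spec_remove_empty_regions_py; infer_instance

-- ===== CLAIM (what is proved, stated in full; the proofs are below) =====
def Claim_equal_remove_empty_regions_py : Prop := ∀ (lines : List String), Dom_remove_empty_regions_py lines → Spec_remove_empty_regions_py lines (remove_empty_regions_py lines)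

-- ===== LEMMAS AND PROOFS =====

theorem pvAScan_le (lines : List String) (n j : Nat) (h : j ≤ n) :
    pvAScan lines n j ≤ n := by
  by_cases hc : j < n ∧ PySem.Str.strip (lines.getD j "") = ""
  · rw [pvAScan, dif_pos hc]
    exact pvAScan_le lines n (j + 1) (by omega)
  · rw [pvAScan, dif_neg hc]
    exact h
termination_by n - j
decreasing_by omega

theorem pvAScan_stop (lines : List String) (n j : Nat)
    (h : pvAScan lines n j < n) :
    ¬ PySem.Str.strip (lines.getD (pvAScan lines n j) "") = "" := by
  by_cases hc : j < n ∧ PySem.Str.strip (lines.getD j "") = ""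
  · rw [pvAScan, dif_pos hc] at h ⊢
    exact pvAScan_stop lines n (j + 1) h
  · rw [pvAScan, dif_neg hc] at h ⊢
    intro hs; exact hc ⟨h, hs⟩
termination_by n - j
decreasing_by omega

theorem pv_getD_eq (lines : List String) (j : Nat) (hj : j < lines.length) :
    lines.getD j "" = lines[j] := by
  simp [List.getD_eq_getElem?_getD, List.getElem?_eq_getElem hj]

-- L1: B's pending buffer absorbs the blank run that A's inner scan skips
theorem pvB_absorb (lines : List String) (n : Nat) (hn : n = lines.length) :
    ∀ j res p ps, j ≤ n →
    pvBLoop (lines.drop j) res (p :: ps)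
      = pvBLoop (lines.drop (pvAScan lines n j)) res
          ((p :: ps) ++ (lines.drop j).take (pvAScan lines n j - j)) := by
  intro j res p ps hj
  by_cases h : j < n ∧ PySem.Str.strip (lines.getD j "") = ""
  · rw [pvAScan, dif_pos h]
    have hjlt : j < lines.length := by omega
    have hget := pv_getD_eq lines j hjlt
    have hdrop : lines.drop j = lines[j] :: lines.drop (j + 1) :=
      List.drop_eq_getElem_cons hjlt
    have hge : j + 1 ≤ pvAScan lines n (j + 1) := pvAScan_ge lines n (j + 1)
    have hs : PySem.Str.strip lines[j] = "" := by rw [← hget]; exact h.2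
    have hstep := pvB_absorb lines n hn (j + 1) res p (ps ++ [lines[j]]) (by omega)
    have hsub : pvAScan lines n (j + 1) - j = (pvAScan lines n (j + 1) - (j + 1)) + 1 := by omega
    rw [hdrop]
    simp only [pvBLoop, hs]
    rw [if_pos trivial, List.cons_append, hstep]
    rw [hsub, List.take_succ_cons]
    simp
  · rw [pvAScan, dif_neg h]
    simp
termination_by j => n - j
decreasing_by omega

-- L2: A appends the blank run one line at a time
theorem pvA_blanks (lines : List String) (n : Nat) (hn : n = lines.length) :
    ∀ j res, j ≤ n →
    pvALoop lines n j res
      = pvALoop lines n (pvAScan lines n j) (res ++ (lines.drop j).take (pvAScan lines n j - j)) := by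
  intro j res hj
  by_cases h : j < n ∧ PySem.Str.strip (lines.getD j "") = ""
  · rw [pvAScan, dif_pos h]
    have hjlt : j < lines.length := by omega
    have hget := pv_getD_eq lines j hjlt
    have hdrop : lines.drop j = lines[j] :: lines.drop (j + 1) :=
      List.drop_eq_getElem_cons hjlt
    have hge : j + 1 ≤ pvAScan lines n (j + 1) := pvAScan_ge lines n (j + 1)
    have hsub : pvAScan lines n (j + 1) - j = (pvAScan lines n (j + 1) - (j + 1)) + 1 := by omega
    rw [pvALoop, dif_pos h.1]
    rw [if_neg (by rw [h.2]; decide)]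
    rw [pvA_blanks lines n hn (j + 1) (res ++ [lines.getD j ""]) (by omega)]
    congr 1
    rw [hdrop, hsub, List.take_succ_cons, hget]
    simp
  · rw [pvAScan, dif_neg h]
    simp
termination_by j => n - j
decreasing_by omega

-- L3: a non-blank, non-#endregion line flushes B's pending buffer
theorem pvB_flush (h : String) (t res : List String) (p : String) (ps : List String)
    (hs : ¬ PySem.Str.strip h = "")
    (he : ¬ PySem.Str.startswith (PySem.Str.strip h) "#endregion" = true) :
    pvBLoop (h :: t) res (p :: ps) = pvBLoop (h :: t) (res ++ (p :: ps)) [] := by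
  simp only [pvBLoop, if_neg hs, if_neg he]

-- Main invariant: A's loop at index i equals B's loop on the remaining suffix
theorem pv_main (lines : List String) (n : Nat) (hn : n = lines.length) :
    ∀ k i res, n - i ≤ k →
    pvALoop lines n i res = pvBLoop (lines.drop i) res [] := by
  intro k
  induction k with
  | zero =>
    intro i res hk
    rw [pvALoop, dif_neg (by omega)]
    rw [List.drop_eq_nil_of_le (by omega)]
    simp [pvBLoop]
  | succ k ih =>
    intro i res hk
    by_cases hi : i < n
    · have hilt : i < lines.length := by omega
      have hget := pv_getD_eq lines i hilt
      have hdrop : lines.drop i = lines[i] :: lines.drop (i + 1) :=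
        List.drop_eq_getElem_cons hilt
      rw [pvALoop, dif_pos hi]
      by_cases hr : PySem.Str.startswith (PySem.Str.strip (lines.getD i "")) "#region" = true
      · -- region line: B starts a pending buffer, which absorbs the blank run
        rw [if_pos hr]
        set j := pvAScan lines n (i + 1) with hj
        have hge : i + 1 ≤ j := pvAScan_ge lines n (i + 1)
        have hle : j ≤ n := pvAScan_le lines n (i + 1) (by omega)
        have hrhs : pvBLoop (lines.drop i) res []
            = pvBLoop (lines.drop j) res (lines.getD i "" :: (lines.drop (i + 1)).take (j - (i + 1))) := by
          rw [hdrop]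
          simp only [pvBLoop]
          rw [← hget, if_pos hr]
          rw [pvB_absorb lines n hn (i + 1) res (lines.getD i "") [] (by omega), ← hj]
          simp
        rw [hrhs]
        by_cases hend : j < n ∧ PySem.Str.startswith (PySem.Str.strip (lines.getD j "")) "#endregion" = true
        · -- empty region: both drop it
          rw [if_pos hend]
          have hjlt : j < lines.length := by omega
          have hgetj := pv_getD_eq lines j hjlt
          have hdropj : lines.drop j = lines[j] :: lines.drop (j + 1) :=
            List.drop_eq_getElem_cons hjlt
          have hsj : ¬ PySem.Str.strip lines[j] = "" := by
            rw [← hgetj]; exact pvAScan_stop lines n (i + 1) (by omega)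
          rw [hdropj]
          simp only [pvBLoop, if_neg hsj]
          rw [if_pos (by rw [← hgetj]; exact hend.2)]
          exact ih (j + 1) res (by omega)
        · -- non-empty region: A keeps line and walks the blanks; B flushes
          rw [if_neg hend]
          rw [pvA_blanks lines n hn (i + 1) (res ++ [lines.getD i ""]) (by omega), ← hj]
          rw [ih j (res ++ [lines.getD i ""] ++ (lines.drop (i + 1)).take (j - (i + 1))) (by omega)]
          by_cases hjn : j < n
          · have hjlt : j < lines.length := by omega
            have hgetj := pv_getD_eq lines j hjlt
            have hdropj : lines.drop j = lines[j] :: lines.drop (j + 1) :=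
              List.drop_eq_getElem_cons hjlt
            have hsj : ¬ PySem.Str.strip lines[j] = "" := by
              rw [← hgetj]; exact pvAScan_stop lines n (i + 1) (by omega)
            have hej : ¬ PySem.Str.startswith (PySem.Str.strip lines[j]) "#endregion" = true := by
              rw [← hgetj]; intro hx; exact hend ⟨hjn, hx⟩
            rw [hdropj, pvB_flush lines[j] (lines.drop (j + 1)) res
                (lines.getD i "") ((lines.drop (i + 1)).take (j - (i + 1))) hsj hej]
            simp
          · have hnil : lines.drop j = [] := List.drop_eq_nil_of_le (by omega)
            rw [hnil]
            simp [pvBLoop]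
      · -- non-region line: both sides append and step
        rw [if_neg hr, hdrop]
        simp only [pvBLoop]
        rw [← hget, if_neg hr]
        exact ih (i + 1) (res ++ [lines.getD i ""]) (by omega)
    · rw [pvALoop, dif_neg hi]
      rw [List.drop_eq_nil_of_le (by omega)]
      simp [pvBLoop]

-- ===== VERDICT (by name: the statement is the Claim_ definition above) =====
theorem remove_empty_regions_py_spec : Claim_equal_remove_empty_regions_py := by
  intro lines _
  show remove_empty_regions_py lines = remove_empty_regions_py_alt lines
  unfold remove_empty_regions_py remove_empty_regions_py_alt
  simpa using pv_main lines lines.length rfl lines.length 0 [] (by omega)
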